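-- pv_equiv track=rewrite | github.com/dudamarlena/pyc_source | pycfiles/safe_access-1.1.macosx-10.10-intel.tar/__init__.py | _pop_from_path
-- ===== SOURCE A (Python) =====
-- SINGLE_QUOTE = "'"
--
-- DOUBLE_QUOTE = '"'
--
-- def _pop_from_path(remaining_path):
--     if not remaining_path:
--         return (None, None)
--     else:
--         end_index = len(remaining_path)
--         str_terminator = None
--         for index, c in enumerate(remaining_path[1:]):
--             if index == 0 and (c == SINGLE_QUOTE or c == DOUBLE_QUOTE):
--                 str_terminator = c
--             elif c == str_terminator:
--                 str_terminator = None
--             elif not str_terminator and (c == '.' or c == '['):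
--                 end_index = index + 1
--                 break
--
--         if str_terminator:
--             raise Exception('Invalid path specification: end quote not found')
--         return (
--          remaining_path[:end_index], remaining_path[end_index:])
-- ===== SOURCE B (Python) =====
-- SINGLE_QUOTE = "'"
--
-- DOUBLE_QUOTE = '"'
--
-- def _pop_from_path(remaining_path):
--     if not remaining_path:
--         return (None, None)
--     q = remaining_path[1:2]
--     if q == SINGLE_QUOTE or q == DOUBLE_QUOTE:
--         close = remaining_path.find(q, 2)
--         if close == -1:
--             raise Exception('Invalid path specification: end quote not found')
--         start = close + 1
--     else:
--         start = 1
--     end_index = len(remaining_path)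
--     for i in range(start, len(remaining_path)):
--         if remaining_path[i] == '.' or remaining_path[i] == '[':
--             end_index = i
--             break
--     return (remaining_path[:end_index], remaining_path[end_index:])
-- ===== Notes on version B (the rewrite author's own statement) =====
-- stated objective: simpler
-- what changed: Replaces the single stateful enumerate loop (quote-terminator state machine with break) by a two-phase decomposition: first locate the closing quote with str.find (raising the same exception if absent), then a plain scan for the first delimiter character from the computed start position.
import Mathlib
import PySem

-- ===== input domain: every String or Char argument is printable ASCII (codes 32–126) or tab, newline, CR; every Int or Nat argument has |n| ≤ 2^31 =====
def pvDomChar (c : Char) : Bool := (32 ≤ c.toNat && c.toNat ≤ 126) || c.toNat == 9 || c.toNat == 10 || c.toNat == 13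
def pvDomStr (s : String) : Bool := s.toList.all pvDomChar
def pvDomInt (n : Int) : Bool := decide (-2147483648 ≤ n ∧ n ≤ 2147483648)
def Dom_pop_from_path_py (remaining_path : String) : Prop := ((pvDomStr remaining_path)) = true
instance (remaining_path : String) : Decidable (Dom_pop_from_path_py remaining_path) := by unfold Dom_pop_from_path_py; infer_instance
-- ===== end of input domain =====

-- B replaces A's stateful quote/terminator scan by find-the-close-quote then scan-for-delimiter
-- (objective: simpler decomposition; same behaviour, same exception on an unterminated quote).
-- Both Pythons raise the same Exception on an unterminated quote at position 1; Pre_ excludes those inputs.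

-- ===== PORT A =====
-- A's loop over enumerate(remaining_path[1:]) with state (end_index, str_terminator) and break.
-- Returns (end_index, str_terminator) after the loop; a remaining terminator means Python raises
-- (those inputs lie outside Pre_; the port returns (none, none) there as a placeholder).
def popA_loop (cs : List Char) (index : Nat) (term : Option Char) (endIdx : Nat) : Nat × Option Char :=
  match cs with
  | [] => (endIdx, term)
  | c :: rest =>
    if index == 0 && (c == '\'' || c == '"') then popA_loop rest (index + 1) (some c) endIdx
    else if some c == term then popA_loop rest (index + 1) none endIdx
    else if term == none && (c == '.' || c == '[') then (index + 1, none)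
    else popA_loop rest (index + 1) term endIdx

-- slices remaining_path[:e] / remaining_path[e:] with 0 ≤ e ≤ len are exactly take/drop
def pop_from_path_py (remaining_path : String) : Option String × Option String :=
  let cs := remaining_path.toList
  if cs = [] then (none, none)
  else
    match popA_loop (cs.drop 1) 0 none cs.length with
    | (_, some _) => (none, none)  -- Python: raise Exception(...) — excluded by Pre_
    | (e, none) => (some (String.mk (cs.take e)), some (String.mk (cs.drop e)))

-- ===== PORT B =====
-- index (relative) of the first occurrence of q in cs (Python's str.find restricted to the tail)
def popB_find (cs : List Char) (q : Char) : Option Nat :=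
  match cs with
  | [] => none
  | c :: rest => if c == q then some 0 else (popB_find rest q).map (· + 1)

-- first position ≥ pos holding '.' or '[' (cs is the suffix starting at pos); len if none
def popB_scan (cs : List Char) (pos : Nat) (len : Nat) : Nat :=
  match cs with
  | [] => len
  | c :: rest => if c == '.' || c == '[' then pos else popB_scan rest (pos + 1) len

def pop_from_path_py_alt (remaining_path : String) : Option String × Option String :=
  let cs := remaining_path.toList
  match cs with
  | [] => (none, none)
  | _ :: rest =>
    let start? : Option Nat :=
      match rest with
      | q :: rest2 =>
        if q == '\'' || q == '"' then
          match popB_find rest2 q with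
          | none => none        -- Python: raise Exception(...) — excluded by Pre_
          | some j => some (j + 3)   -- close = j + 2 (absolute), start = close + 1
        else some 1
      | [] => some 1
    match start? with
    | none => (none, none)
    | some st =>
      let e := popB_scan (cs.drop st) st cs.length
      (some (String.mk (cs.take e)), some (String.mk (cs.drop e)))

-- ===== PRECONDITION & SPEC =====
-- Pre_ excludes exactly the inputs on which A raises: second character is a quote with no
-- matching closing quote afterwards (B raises the identical exception there).
def Pre_pop_from_path_py (remaining_path : String) : Prop :=
  (remaining_path.toList.getD 1 ' ' = '\'' ∨ remaining_path.toList.getD 1 ' ' = '"') →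
    remaining_path.toList.getD 1 ' ' ∈ remaining_path.toList.drop 2
instance (remaining_path : String) : Decidable (Pre_pop_from_path_py remaining_path) := by
  unfold Pre_pop_from_path_py; infer_instance

def pvWitness_pop_from_path_py : String := "a'b'.c"

def Spec_pop_from_path_py (remaining_path : String) (out : Option String × Option String) : Prop := out = pop_from_path_py_alt remaining_path
instance (remaining_path : String) (out : Option String × Option String) : Decidable (Spec_pop_from_path_py remaining_path out) := by unfold Spec_pop_from_path_py; infer_instance

-- ===== CLAIM (what is proved, stated in full; the proofs are below) =====
def Claim_equal_pop_from_path_py : Prop := ∀ (remaining_path : String), Dom_pop_from_path_py remaining_path → Pre_pop_from_path_py remaining_path → Spec_pop_from_path_py remaining_path (pop_from_path_py remaining_path)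

-- ===== LEMMAS AND PROOFS =====

-- With no active terminator and index ≥ 1, A's loop is exactly B's delimiter scan (offset by 1).
lemma loopA_none (L : Nat) :
    ∀ (tl : List Char) (i : Nat),
      popA_loop tl (i + 1) none L = (popB_scan tl (i + 2) L, none) := by
  intro tl
  induction tl with
  | nil => intro i; simp [popA_loop, popB_scan]
  | cons c rest ih =>
    intro i
    by_cases hd : (c == '.' || c == '[') = true
    · simp [popA_loop, popB_scan, hd]
    · simp only [popA_loop, popB_scan, Bool.eq_false_iff.mpr hd]
      simp [ih (i + 1), Nat.add_assoc, Bool.eq_false_iff.mpr hd]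

-- With terminator q active and index ≥ 1, A's loop first looks for q, then scans for a delimiter.
lemma loopA_quote (q : Char) (L : Nat) :
    ∀ (tl : List Char) (i : Nat),
      popA_loop tl (i + 1) (some q) L =
        (match popB_find tl q with
         | none => (L, some q)
         | some j => (popB_scan (tl.drop (j + 1)) (i + j + 3) L, none)) := by
  intro tl
  induction tl with
  | nil => intro i; simp [popA_loop, popB_find]
  | cons c rest ih =>
    intro i
    by_cases hc : c = q
    · subst hc
      simp [popA_loop, popB_find, loopA_none L rest (i + 1), Nat.add_assoc]
    · have hcq : (c == q) = false := by simp [hc]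
      have hsq : (some c == some q) = false := by simp [hc]
      simp only [popA_loop, popB_find, hcq, hsq]
      simp only [show ((i + 1 : Nat) == 0) = false from by simp,
        show ((some q : Option Char) == none) = false from by simp,
        Bool.false_and, Bool.and_false, Bool.false_eq_true, if_false]
      rw [ih (i + 1)]
      cases hf : popB_find rest q with
      | none => simp
      | some j =>
        have : i + 1 + j + 3 = i + (j + 1) + 3 := by omega
        simp [this]

-- popB_find finds any member of the list
lemma popB_find_mem (q : Char) : ∀ (tl : List Char), q ∈ tl → popB_find tl q ≠ none := by
  intro tl
  induction tl with
  | nil => simp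
  | cons a rest ih =>
    intro hmem
    by_cases ha : a = q
    · simp [popB_find, ha]
    · have hrest : q ∈ rest := by
        rcases List.mem_cons.mp hmem with h | h
        · exact absurd h.symm ha
        · exact h
      simp only [popB_find, show (a == q) = false from by simp [ha], Bool.false_eq_true, if_false]
      cases hf : popB_find rest q with
      | none => exact absurd hf (ih hrest)
      | some j => simp

-- ===== VERDICT (by name: the statement is the Claim_ definition above) =====
theorem pop_from_path_py_spec : Claim_equal_pop_from_path_py := by
  intro s _ hpre
  unfold Spec_pop_from_path_py pop_from_path_py pop_from_path_py_alt
  cases hcs : s.toList with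
  | nil => simp
  | cons c rest =>
    cases rest with
    | nil => simp [popA_loop, popB_scan]
    | cons q rest2 =>
      dsimp only
      by_cases hq : (q == '\'' || q == '"') = true
      · -- quote at position 1: A enters terminator mode; B finds the closing quote
        have hstep : popA_loop ((c :: q :: rest2).drop 1) 0 none (c :: q :: rest2).length
            = popA_loop rest2 (0 + 1) (some q) (c :: q :: rest2).length := by
          simp [popA_loop, hq]
        rw [hstep, loopA_quote]
        cases hf : popB_find rest2 q with
        | none =>
          -- excluded by Pre_: an unterminated quote makes both Pythons raise
          exfalso
          have hmem : q ∈ rest2 := by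
            unfold Pre_pop_from_path_py at hpre
            rw [hcs] at hpre
            simpa using hpre (by simpa using hq)
          exact popB_find_mem q rest2 hmem hf
        | some j =>
          have hdrop : (c :: q :: rest2).drop (j + 3) = rest2.drop (j + 1) := by
            simp [show j + 3 = j + 1 + 1 + 1 from by omega, List.drop_succ_cons]
          simp [hf, hq, hdrop]
      · -- no quote at position 1: A's loop is B's plain delimiter scan from position 1
        by_cases hd : (q == '.' || q == '[') = true
        · simp [popA_loop, popB_scan, Bool.eq_false_iff.mpr hq, hd]
        · have h1 : popA_loop ((c :: q :: rest2).drop 1) 0 none (c :: q :: rest2).length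
              = popA_loop rest2 (0 + 1) none (c :: q :: rest2).length := by
            simp [popA_loop, Bool.eq_false_iff.mpr hq, Bool.eq_false_iff.mpr hd]
          rw [h1, loopA_none]
          simp [popB_scan, Bool.eq_false_iff.mpr hq, Bool.eq_false_iff.mpr hd]
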